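-- pv_equiv track=rewrite | github.com/diegoirra/ograndecomobokita | edmondskarp.py | get_aug_flow
-- ===== SOURCE A (Python) =====
-- def get_aug_flow(graph, path):
--     aug_flow = 999999999999999
--     for i in range(len(path)-2):
--         for e in graph[1]:
--             (u,w),weight = e
--             if u==path[i] and w==path[i+1]:
--                 aug_flow = min(aug_flow, weight)
--     return aug_flow
-- ===== SOURCE B (Python) =====
-- def get_aug_flow(graph, path):
--     if len(path) < 3:
--         return 999999999999999
--     pairs = set(zip(path[:-2], path[1:-1]))
--     weights = [wt for (u, w), wt in graph[1] if (u, w) in pairs]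
--     return min([999999999999999] + weights)
-- ===== Notes on version B (the rewrite author's own statement) =====
-- stated objective: faster
-- what changed: B builds the set of consecutive path pairs once by zipping two slices of path, filters graph[1] in a single pass by set membership, and returns the min of the selected weights with the sentinel prepended, instead of A's nested rescans of graph[1] per path index (A's range(len(path)-2) bound, skipping the last edge, is kept via the slice path[:-2]); intended as faster (one pass instead of len(path) passes over the edge list), measured 1.85-2.4x at the largest timing size.
import Mathlib
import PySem

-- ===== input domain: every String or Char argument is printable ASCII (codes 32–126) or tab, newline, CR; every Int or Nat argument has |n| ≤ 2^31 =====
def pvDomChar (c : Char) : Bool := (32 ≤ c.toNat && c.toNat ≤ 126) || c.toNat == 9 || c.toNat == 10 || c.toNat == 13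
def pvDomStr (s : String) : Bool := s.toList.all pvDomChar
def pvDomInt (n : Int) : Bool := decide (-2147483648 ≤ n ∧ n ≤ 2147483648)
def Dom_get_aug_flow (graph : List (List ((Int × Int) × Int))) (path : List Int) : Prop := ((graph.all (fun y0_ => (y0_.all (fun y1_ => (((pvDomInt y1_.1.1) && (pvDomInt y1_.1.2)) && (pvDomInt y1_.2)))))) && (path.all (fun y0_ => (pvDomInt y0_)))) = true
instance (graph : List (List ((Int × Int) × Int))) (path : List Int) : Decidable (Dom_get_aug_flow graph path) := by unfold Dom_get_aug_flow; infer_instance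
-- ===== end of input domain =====

-- B replaces A's rescans of graph[1] per path index by one filtering pass over graph[1]
-- against a set of consecutive path pairs built by zipping two slices of path
-- (A's range(len(path)-2) bound, which skips the last edge, kept via path[:-2]).


-- ===== PORT A =====
-- graph[1] raises IndexError when graph is too short (excluded by Pre_); pyGet? … .getD [] there.
def get_aug_flow (graph : List (List ((Int × Int) × Int))) (path : List Int) : Int :=
  (PySem.List.pyRange 0 ((path.length : Int) - 2) 1).foldl
    (fun af i =>
      ((PySem.List.pyGet? graph 1).getD []).foldl
        (fun af e =>
          if e.1.1 = PySem.List.pyGetD path i 0 ∧ e.1.2 = PySem.List.pyGetD path (i + 1) 0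
          then min af e.2 else af)
        af)
    999999999999999

-- ===== PORT B =====
def get_aug_flow_alt (graph : List (List ((Int × Int) × Int))) (path : List Int) : Int :=
  if path.length < 3 then 999999999999999
  else
    let pairs : PySem.Set (Int × Int) :=
      PySem.Set.ofList ((PySem.List.slice path none (some (-2))).zip
                        (PySem.List.slice path (some 1) (some (-1))))
    let weights :=
      (((PySem.List.pyGet? graph 1).getD []).filter
        (fun e => PySem.Set.contains pairs e.1)).map (fun e => e.2)
    weights.foldl min 999999999999999

-- ===== PRECONDITION & SPEC =====
-- Pre_ excludes exactly the inputs where both Pythons raise IndexError on graph[1].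
def Pre_get_aug_flow (graph : List (List ((Int × Int) × Int))) (path : List Int) : Prop :=
  path.length ≤ 2 ∨ 2 ≤ graph.length
instance (graph : List (List ((Int × Int) × Int))) (path : List Int) : Decidable (Pre_get_aug_flow graph path) := by unfold Pre_get_aug_flow; infer_instance

def pvWitness_get_aug_flow : (List (List ((Int × Int) × Int))) × List Int :=
  ([[], [(((0 : Int), (1 : Int)), (5 : Int))]], [0, 1, 2])

def Spec_get_aug_flow (graph : List (List ((Int × Int) × Int))) (path : List Int) (out : Int) : Prop := out = get_aug_flow_alt graph path
instance (graph : List (List ((Int × Int) × Int))) (path : List Int) (out : Int) : Decidable (Spec_get_aug_flow graph path out) := by unfold Spec_get_aug_flow; infer_instance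

-- ===== CLAIM (what is proved, stated in full; the proofs are below) =====
def Claim_equal_get_aug_flow : Prop := ∀ (graph : List (List ((Int × Int) × Int))) (path : List Int), Dom_get_aug_flow graph path → Pre_get_aug_flow graph path → Spec_get_aug_flow graph path (get_aug_flow graph path)

-- ===== LEMMAS AND PROOFS =====

-- fold "take min of weight when the edge's endpoint pair satisfies q"
def pvBest (q : Int × Int → Bool) (E : List ((Int × Int) × Int)) (acc : Int) : Int :=
  E.foldl (fun af e => if q e.1 then min af e.2 else af) acc

theorem pvBest_cons (q : Int × Int → Bool) (e : (Int × Int) × Int)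
    (E : List ((Int × Int) × Int)) (acc : Int) :
    pvBest q (e :: E) acc = pvBest q E (if q e.1 then min acc e.2 else acc) := rfl

theorem pvBest_min (q : Int × Int → Bool) (E : List ((Int × Int) × Int)) (a b : Int) :
    pvBest q E (min a b) = min a (pvBest q E b) := by
  induction E generalizing b with
  | nil => rfl
  | cons e E ih =>
    rw [pvBest_cons, pvBest_cons]
    by_cases h : q e.1 = true
    · simp only [h, if_true, min_assoc, ih]
    · simp only [h, if_false, Bool.false_eq_true, ih]

theorem pvBest_false (E : List ((Int × Int) × Int)) (acc : Int) :
    pvBest (fun _ => false) E acc = acc := by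
  induction E generalizing acc with
  | nil => rfl
  | cons e E ih => rw [pvBest_cons]; simp only [Bool.false_eq_true, if_false]; exact ih acc

theorem pvBest_congr (q q' : Int × Int → Bool) (h : ∀ x, q x = q' x)
    (E : List ((Int × Int) × Int)) (acc : Int) :
    pvBest q E acc = pvBest q' E acc := by
  have : q = q' := funext h
  rw [this]

theorem pvBest_or (p q : Int × Int → Bool) (E : List ((Int × Int) × Int)) (acc : Int) :
    pvBest (fun x => p x || q x) E acc = pvBest q E (pvBest p E acc) := by
  induction E generalizing acc with
  | nil => rfl
  | cons e E ih =>
    simp only [pvBest_cons]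
    by_cases hp : p e.1 = true <;> by_cases hq : q e.1 = true <;>
      simp only [hp, hq, Bool.true_or, Bool.or_true, Bool.false_or, if_true,
        Bool.false_eq_true, ite_false]
    · rw [ih]
      have hX : pvBest p E (min acc e.2) = min e.2 (pvBest p E acc) := by
        rw [min_comm, pvBest_min]
      rw [hX]
      congr 1
      omega
    · rw [ih]
    · rw [ih]
      have hX : pvBest p E (min acc e.2) = min e.2 (pvBest p E acc) := by
        rw [min_comm, pvBest_min]
      rw [hX]
      congr 1
      omega
    · rw [ih]

theorem pvFold_eq_mem (ps : List (Int × Int)) (E : List ((Int × Int) × Int)) (acc : Int) :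
    ps.foldl (fun af p => pvBest (fun x => decide (x = p)) E af) acc
      = pvBest (fun x => decide (x ∈ ps)) E acc := by
  induction ps generalizing acc with
  | nil =>
    simp only [List.foldl_nil, List.not_mem_nil, decide_false]
    exact (pvBest_false E acc).symm
  | cons p ps ih =>
    simp only [List.foldl_cons]
    rw [ih, ← pvBest_or]
    exact pvBest_congr _ _ (fun x => by simp [List.mem_cons]) E acc

-- B's filter-then-map-then-min pass is a pvBest
theorem pvFilterMin (p : ((Int × Int) × Int) → Bool) (E : List ((Int × Int) × Int)) (acc : Int) :
    ((E.filter p).map (fun e => e.2)).foldl min acc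
      = E.foldl (fun af e => if p e then min af e.2 else af) acc := by
  induction E generalizing acc with
  | nil => rfl
  | cons e E ih =>
    by_cases h : p e = true
    · simp only [List.filter_cons, h, if_true, List.map_cons, List.foldl_cons, ih]
    · simp only [List.filter_cons, h, Bool.false_eq_true, if_false, List.foldl_cons, ih]

-- A's index pairs as a list; equals B's zip of slices
def pvRangePairs (path : List Int) : List (Int × Int) :=
  (PySem.List.pyRange 0 ((path.length : Int) - 2) 1).map
    (fun i => (PySem.List.pyGetD path i 0, PySem.List.pyGetD path (i + 1) 0))

theorem pvZip_eq_rangePairs (path : List Int) :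
    (PySem.List.slice path none (some (-2))).zip (PySem.List.slice path (some 1) (some (-1)))
      = pvRangePairs path := by
  rw [PySem.List.slice_to_neg_ofNat path 2 (by omega)]
  have h1 : PySem.List.slice path (some 1) (some (-1))
      = (path.drop 1).take (path.length - 2) := by
    rcases path with _ | ⟨x, xs⟩
    · rfl
    · unfold PySem.List.slice
      simp only [PySem.List.clampIdx_neg_one]
      have hc : PySem.List.clampIdx (x :: xs).length 1 = 1 := by
        simp [PySem.List.clampIdx]
      rw [hc]
      congr 1
  rw [h1]
  unfold pvRangePairs
  apply List.ext_getElem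
  · simp [PySem.List.length_pyRange_one]
    omega
  · intro k hk1 hk2
    have hk : k < path.length - 2 := by
      simp at hk1; omega
    simp only [List.getElem_zip, List.getElem_take, List.getElem_map, List.getElem_drop,
      PySem.List.getElem_pyRange_one]
    have e1 : (0 : Int) + (k : Int) = ((k : Nat) : Int) := by omega
    have e2 : (k : Int) + 1 = ((k + 1 : Nat) : Int) := by omega
    rw [e1, e2, PySem.List.pyGetD_natCast, PySem.List.pyGetD_natCast,
      List.getD_eq_getElem _ _ (by omega), List.getD_eq_getElem _ _ (by omega)]
    simp [Nat.add_comm]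

-- A as one pvBest with a membership test over the list of consecutive path pairs
theorem getA_eq (graph : List (List ((Int × Int) × Int))) (path : List Int) :
    get_aug_flow graph path
      = pvBest (fun x => decide (x ∈ pvRangePairs path))
          ((PySem.List.pyGet? graph 1).getD []) 999999999999999 := by
  unfold get_aug_flow pvRangePairs
  rw [← pvFold_eq_mem, List.foldl_map]
  apply PySem.List.foldl_congr_mem
  intro af i _
  apply PySem.List.foldl_congr_mem
  intro af' e _
  congr 1
  simp [Prod.ext_iff]

theorem get_aug_flow_eq_alt (graph : List (List ((Int × Int) × Int))) (path : List Int) :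
    get_aug_flow graph path = get_aug_flow_alt graph path := by
  rw [getA_eq]
  unfold get_aug_flow_alt
  by_cases h3 : path.length < 3
  · rw [if_pos h3]
    have : pvRangePairs path = [] := by
      unfold pvRangePairs
      rw [PySem.List.pyRange_one_eq_nil (by omega)]
      rfl
    rw [this]
    have hq : (fun x => decide (x ∈ ([] : List (Int × Int)))) = (fun _ : Int × Int => false) := by
      funext x; simp
    rw [hq, pvBest_false]
  · rw [if_neg h3]
    simp only [pvZip_eq_rangePairs]
    rw [pvFilterMin]
    unfold pvBest
    apply PySem.List.foldl_congr_mem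
    intro af e _
    congr 1
    simp [PySem.Set.contains, PySem.Set.mem_ofList]

-- ===== VERDICT (by name: the statement is the Claim_ definition above) =====
theorem get_aug_flow_spec : Claim_equal_get_aug_flow := by
  intro graph path _ _
  unfold Spec_get_aug_flow
  exact get_aug_flow_eq_alt graph path
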